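-- pv_equiv track=rewrite | github.com/jtb324/ibd_dendrogram | ibd_dendrogram/make_distance_matrix.py | _generate_label_colors
-- ===== SOURCE A (Python) =====
-- def _generate_label_colors(grid_list: list[str], cases: list[str]) -> dict[str, str]:
--     """Function that will generate the color dictionary
--     indicating what color each id label should be
--
--     Parameters
--     ----------
--     grid_list : list[str]
--         list of id strings
--
--     cases : list of individuals who are considered cases for a
--     disease or phenotype
--
--     Returns
--     -------
--     dict[str,str]
--         returns a dictionary where the key is the id and the
--         values are the color of the label for that id.
--     """
--     color_dict = {}
--
--     for grid in grid_list:
--         if grid in cases: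
--             color_dict[grid] = "r"
--         else:
--             color_dict[grid] = "k"
--
--     return color_dict
-- ===== SOURCE B (Python) =====
-- def _generate_label_colors(grid_list: list[str], cases: list[str]) -> dict[str, str]:
--     """Default every id to black, then mark the cases present in grid_list red."""
--     color_dict = dict.fromkeys(grid_list, "k")
--     grid_set = set(grid_list)
--     for case in cases:
--         if case in grid_set:
--             color_dict[case] = "r"
--     return color_dict
-- ===== Notes on version B (the rewrite author's own statement) =====
-- stated objective: faster
-- what changed: Instead of one pass over grid_list with a linear 'in cases' list scan per id, B builds the dict with all ids defaulted to 'k' via dict.fromkeys and then overrides with 'r' by iterating over cases, guarded by an O(1) set-membership test against set(grid_list).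
import Mathlib
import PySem

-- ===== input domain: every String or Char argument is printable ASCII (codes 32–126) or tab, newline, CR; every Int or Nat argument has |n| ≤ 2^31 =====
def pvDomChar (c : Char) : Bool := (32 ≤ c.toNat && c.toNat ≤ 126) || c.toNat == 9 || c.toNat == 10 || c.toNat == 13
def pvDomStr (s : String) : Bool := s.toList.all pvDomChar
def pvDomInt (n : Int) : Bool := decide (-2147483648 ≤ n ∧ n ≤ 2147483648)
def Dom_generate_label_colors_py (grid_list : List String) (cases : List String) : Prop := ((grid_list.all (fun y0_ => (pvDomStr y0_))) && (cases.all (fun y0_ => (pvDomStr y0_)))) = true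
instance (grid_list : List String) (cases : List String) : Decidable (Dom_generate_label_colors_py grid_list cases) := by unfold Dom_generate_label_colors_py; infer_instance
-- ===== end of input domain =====

-- B replaces A's per-id linear scan of `cases` with dict.fromkeys defaults plus a
-- set-guarded override pass over `cases` (objective: faster, O(n*m) → O(n+m)).

-- ===== PORT A =====
def generate_label_colors_py (grid_list : List String) (cases : List String) : List (String × String) :=
  (grid_list.foldl
    (fun d grid =>
      if cases.contains grid then d.insert grid "r" else d.insert grid "k")
    (PySem.Dict.empty : PySem.Dict String String)).items

-- ===== PORT B =====
def generate_label_colors_py_alt (grid_list : List String) (cases : List String) : List (String × String) :=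
  let color_dict : PySem.Dict String String :=
    grid_list.foldl (fun d g => d.insert g "k") PySem.Dict.empty
  let grid_set : PySem.Set String := PySem.Set.ofList grid_list
  (cases.foldl
    (fun d case => if PySem.Set.contains grid_set case then d.insert case "r" else d)
    color_dict).items

-- ===== PRECONDITION & SPEC =====
def Spec_generate_label_colors_py (grid_list : List String) (cases : List String) (out : List (String × String)) : Prop := out = generate_label_colors_py_alt grid_list cases
instance (grid_list : List String) (cases : List String) (out : List (String × String)) : Decidable (Spec_generate_label_colors_py grid_list cases out) := by unfold Spec_generate_label_colors_py; infer_instance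

-- ===== CLAIM (what is proved, stated in full; the proofs are below) =====
def Claim_equal_generate_label_colors_py : Prop := ∀ (grid_list : List String) (cases : List String), Dom_generate_label_colors_py grid_list cases → Spec_generate_label_colors_py grid_list cases (generate_label_colors_py grid_list cases)

-- ===== LEMMAS AND PROOFS =====

-- get? of a fold that inserts each key with a value determined by the key alone
theorem get?_foldl_insert_fun (f : String → String) (l : List String)
    (d : PySem.Dict String String) (k : String) :
    (l.foldl (fun d g => d.insert g (f g)) d).get? k
      = if k ∈ l then some (f k) else d.get? k := by
  induction l generalizing d with
  | nil => simp
  | cons g t ih =>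
    simp only [List.foldl_cons, ih]
    by_cases ht : k ∈ t
    · simp [ht]
    · by_cases hg : k = g
      · subst hg; simp [ht, PySem.Dict.get?_insert_self]
      · simp [ht, hg, PySem.Dict.get?_insert_of_ne _ _ hg]

-- get? of B's override pass: "r" for the guarded cases, unchanged otherwise
theorem get?_override (gsb : String → Bool) (cs : List String)
    (d : PySem.Dict String String) (k : String) :
    (cs.foldl (fun d c => if gsb c then d.insert c "r" else d) d).get? k
      = if k ∈ cs ∧ gsb k then some "r" else d.get? k := by
  induction cs generalizing d with
  | nil => simp
  | cons c t ih =>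
    simp only [List.foldl_cons, ih]
    by_cases ht : k ∈ t ∧ gsb k = true
    · simp [ht, List.mem_cons]
    · by_cases hk : k = c
      · subst hk
        by_cases hg : gsb k = true
        · simp [hg, PySem.Dict.get?_insert_self]
        · simp [hg]
      · by_cases hg : gsb c = true
        · simp only [hg, if_true]
          rw [PySem.Dict.get?_insert_of_ne _ _ hk]
          simp [ht, List.mem_cons, hk]
        · simp only [hg, Bool.false_eq_true, if_false]
          simp [ht, List.mem_cons, hk]

-- B's override pass never adds a key: its guard only fires on keys already present
theorem keys_override (gsb : String → Bool) (cs : List String)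
    (d : PySem.Dict String String)
    (h : ∀ c, gsb c = true → d.contains c = true) :
    (cs.foldl (fun d c => if gsb c then d.insert c "r" else d) d).keys = d.keys := by
  induction cs generalizing d with
  | nil => rfl
  | cons c t ih =>
    simp only [List.foldl_cons]
    by_cases hg : gsb c = true
    · simp only [hg, if_true]
      rw [ih (d.insert c "r") (fun c' hc' => by
        rw [PySem.Dict.contains_insert]
        simp [h c' hc'])]
      exact PySem.Dict.keys_insert_of_contains _ _ (h c hg)
    · simp only [hg, Bool.false_eq_true, if_false]
      exact ih d h

-- a dict with distinct keys is its keys paired with their looked-up values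
theorem items_eq_map_keys (d : PySem.Dict String String) (h : d.keys.Nodup) :
    d.items = d.keys.map (fun k => (k, (d.get? k).getD "")) := by
  conv_lhs => rw [show d.items = d.items.map id from (List.map_id _).symm]
  simp only [PySem.Dict.keys, List.map_map]
  refine List.map_congr_left (fun p hp => ?_)
  obtain ⟨k, v⟩ := p
  have := PySem.Dict.get?_of_mem_items _ hp h
  simp [Function.comp, this]

-- ===== VERDICT (by name: the statement is the Claim_ definition above) =====
-- the value A assigns to an id depends only on the id
theorem stepA_eq (cases : List String) :
    (fun (d : PySem.Dict String String) grid =>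
        if cases.contains grid then d.insert grid "r" else d.insert grid "k")
      = fun d g => d.insert g (if cases.contains g then "r" else "k") := by
  funext d g
  by_cases h : g ∈ cases <;> simp [h]

theorem generate_label_colors_py_spec : Claim_equal_generate_label_colors_py := by
  intro grid_list cases _
  unfold Spec_generate_label_colors_py generate_label_colors_py generate_label_colors_py_alt
  rw [stepA_eq]
  set fk : String → String := fun g => if cases.contains g then "r" else "k" with hfk
  set gs : PySem.Set String := PySem.Set.ofList grid_list with hgs
  set dA := grid_list.foldl (fun d g => d.insert g (fk g)) (PySem.Dict.empty : PySem.Dict String String) with hdA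
  set d0 := grid_list.foldl (fun d g => d.insert g "k") (PySem.Dict.empty : PySem.Dict String String) with hd0
  set dB := cases.foldl (fun d c => if PySem.Set.contains gs c then d.insert c "r" else d) d0 with hdB
  have hget0 : ∀ k, d0.get? k = if k ∈ grid_list then some "k" else none := by
    intro k
    rw [hd0, get?_foldl_insert_fun (fun _ => "k")]
    simp [PySem.Dict.get?_empty]
  have hcont0 : ∀ c, gs.contains c = true → d0.contains c = true := by
    intro c hc
    have hcm : c ∈ grid_list := by
      have := (PySem.Set.contains_iff gs c).mp hc
      rwa [hgs, PySem.Set.mem_ofList] at this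
    rw [PySem.Dict.contains_eq_isSome_get?, hget0]
    simp [hcm]
  have hkA : dA.keys = gs := by
    rw [hdA, PySem.Dict.keys_foldl_insert grid_list (fun _ g => fk g)]
    simp [PySem.Dict.keys_empty]
    rfl
  have hk0 : d0.keys = gs := by
    rw [hd0, PySem.Dict.keys_foldl_insert grid_list (fun _ _ => "k")]
    simp [PySem.Dict.keys_empty]
    rfl
  have hkB : dB.keys = gs := by
    rw [hdB, keys_override (fun c => PySem.Set.contains gs c) cases d0 hcont0, hk0]
  have hnA : dA.keys.Nodup := by rw [hkA]; exact PySem.Set.nodup_ofList _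
  have hnB : dB.keys.Nodup := by rw [hkB]; exact PySem.Set.nodup_ofList _
  rw [items_eq_map_keys dA hnA, items_eq_map_keys dB hnB, hkA, hkB]
  refine List.map_congr_left (fun k hk => ?_)
  have hkg : k ∈ grid_list := by rwa [hgs, PySem.Set.mem_ofList] at hk
  have hgsk : gs.contains k = true := (PySem.Set.contains_iff gs k).mpr hk
  have hA : dA.get? k = some (fk k) := by
    rw [hdA, get?_foldl_insert_fun fk]
    simp [hkg]
  have hB : dB.get? k = some (fk k) := by
    rw [hdB, get?_override (fun c => PySem.Set.contains gs c) cases d0 k, hget0]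
    by_cases hc : k ∈ cases
    · simp [hc, hk, hfk]
    · simp [hc, hk, hkg, hfk]
  rw [hA, hB]
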